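-- pv_equiv track=rewrite | github.com/totohoon02/BojHub | 프로그래머스/2/42626. 더 맵게/더 맵게.py | solution
-- ===== SOURCE A (Python) =====
-- import heapq
--
-- def solution(scoville, K):
--     count = 0
--     heap = []
--
--     # enque
--     for s in scoville:
--         heapq.heappush(heap, s)
--
--     # mix
--     while True:
--         least_min = heapq.heappop(heap)
--         if least_min >= K:
--             break
--
--         if len(heap) < 1:
--             return -1
--
--         next_min = heapq.heappop(heap)
--
--         new_scoville = least_min + next_min * 2
--         heapq.heappush(heap, new_scoville)
--         count += 1
--
--     return count
-- ===== SOURCE B (Python) =====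
-- def solution(scoville, K):
--     # Huffman-style two-queue algorithm: sort once, then keep mixed values in a
--     # plain FIFO queue `made` (they are produced in non-decreasing order, so the
--     # queue front is always its minimum); the overall minimum is at one of the
--     # two fronts.  No heap / priority structure at all; each step is O(1).
--     base = sorted(scoville)
--     made = []
--     i = j = 0
--     count = 0
--
--     def take():
--         nonlocal i, j
--         if j < len(made) and (i == len(base) or made[j] < base[i]):
--             v = made[j]
--             j += 1
--             return v
--         v = base[i]          # IndexError when nothing is left (empty input), as in A
--         i += 1
--         return v
--
--     while True:
--         least = take()
--         if least >= K:
--             return count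
--         if (len(base) - i) + (len(made) - j) < 1:
--             return -1
--         nxt = take()
--         made.append(least + 2 * nxt)
--         count += 1
-- ===== Notes on version B (the rewrite author's own statement) =====
-- stated objective: faster
-- what changed: Replaces the heap simulation with the Huffman-style two-queue algorithm: sort once, then consume the sorted originals and a plain FIFO queue of mixed values through two front pointers; mixed values are proved to be produced in non-decreasing order, so no priority structure (heap or sorted insertion) is maintained and each mix is O(1).
-- outside the precondition, e.g. on solution([], 5): A raises IndexError, B raises IndexError
import Mathlib
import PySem

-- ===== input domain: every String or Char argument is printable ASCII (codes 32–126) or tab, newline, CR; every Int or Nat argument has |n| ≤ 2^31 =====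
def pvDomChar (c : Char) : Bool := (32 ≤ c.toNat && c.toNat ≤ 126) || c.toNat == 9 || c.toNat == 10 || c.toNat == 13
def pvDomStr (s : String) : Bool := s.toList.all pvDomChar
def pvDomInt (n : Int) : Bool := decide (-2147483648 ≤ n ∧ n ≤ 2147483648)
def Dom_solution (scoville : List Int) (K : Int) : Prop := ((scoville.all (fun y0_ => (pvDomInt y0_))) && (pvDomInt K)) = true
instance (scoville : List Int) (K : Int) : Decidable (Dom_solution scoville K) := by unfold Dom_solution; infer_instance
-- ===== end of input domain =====

-- B replaces A's binary heap by the Huffman-style two-queue algorithm: one initial sort, then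
-- mixed values go into a plain FIFO queue (they are produced in non-decreasing order, proved
-- via the certificate invariant `Cert` below), so no priority structure is maintained at all.


-- ===== PORT A =====
-- A uses heapq only through heappush / heappop / len on a heap of ints; the heap's internal
-- array layout is never observed.  We model the heap exactly by its observable contract:
-- it is the list of pushed elements (heappush appends), and heappop removes and returns a
-- minimal element — exact here because equal Ints are indistinguishable, so WHICH minimal
-- occurrence is removed cannot affect anything A computes (mixA_perm below proves this).
def removeMin (l : List Int) : Option (Int × List Int) :=
  match l with
  | [] => none
  | x :: xs =>
    match removeMin xs with
    | none => some (x, [])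
    | some (m, ys) => if x ≤ m then some (x, xs) else some (m, x :: ys)

-- length fact the recursion of mixA needs for termination
theorem removeMin_length : ∀ {l : List Int} {a : Int} {r : List Int},
    removeMin l = some (a, r) → r.length + 1 = l.length := by
  intro l
  induction l with
  | nil => intro a r h; simp [removeMin] at h
  | cons x xs ih =>
    intro a r h
    simp only [removeMin] at h
    cases hx : removeMin xs with
    | none =>
      rw [hx] at h
      simp at h
      obtain ⟨h1, h2⟩ := h
      subst h2
      cases xs with
      | nil => rfl
      | cons y ys =>
        exfalso
        simp only [removeMin] at hx
        cases hy : removeMin ys with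
        | none => rw [hy] at hx; simp at hx
        | some p =>
          obtain ⟨m, zs⟩ := p
          rw [hy] at hx
          by_cases hle : y ≤ m <;> simp [hle] at hx
    | some p =>
      obtain ⟨m, ys⟩ := p
      rw [hx] at h
      have hlen := ih hx
      by_cases hle : x ≤ m <;> simp [hle] at h <;> obtain ⟨h1, h2⟩ := h <;> subst h2 <;> simp <;> omega

-- the mixing loop of A (`while True: …`); `heap` is the contract-modelled heap
def mixA (K : Int) (heap : List Int) (count : Int) : Int :=
  match h1 : removeMin heap with
  | none => 0        -- Python raises IndexError here (excluded by Pre_)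
  | some (least, rest) =>
    if least ≥ K then count
    else
      match h2 : removeMin rest with
      | none => -1   -- `if len(heap) < 1: return -1`
      | some (nxt, rest2) =>
        mixA K (rest2 ++ [least + nxt * 2]) (count + 1)
termination_by heap.length
decreasing_by
  have ha := removeMin_length h1
  have hb := removeMin_length h2
  simp only [List.length_append, List.length_cons, List.length_nil]
  omega

def solution (scoville : List Int) (K : Int) : Int :=
  -- the enqueue loop: each heappush adds its element to the (contract-modelled) heap
  mixA K (scoville.foldl (fun h s => h ++ [s]) []) 0

-- ===== PORT B =====
-- Source B's take(): the overall minimum sits at one of the two fronts; the read pointers i, j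
-- into base/made are represented by the remaining suffixes
def popMinB (base made : List Int) : Option (Int × List Int × List Int) :=
  match made with
  | m :: ms =>
    match base with
    | [] => some (m, [], ms)
    | b :: bs => if m < b then some (m, base, ms) else some (b, bs, m :: ms)
  | [] =>
    match base with
    | [] => none   -- Python raises IndexError here (excluded by Pre_)
    | b :: bs => some (b, bs, [])

-- length facts the recursion of mixB needs for termination
theorem popMinB_length : ∀ {base made : List Int} {a : Int} {b' m' : List Int},
    popMinB base made = some (a, b', m') →
    b'.length + m'.length + 1 = base.length + made.length := by
  intro base made a b' m' h
  cases made with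
  | nil =>
    cases base with
    | nil => simp [popMinB] at h
    | cons b bs =>
      simp [popMinB] at h
      obtain ⟨h1, h2, h3⟩ := h; subst h2; subst h3; simp
  | cons m ms =>
    cases base with
    | nil =>
      simp [popMinB] at h
      obtain ⟨h1, h2, h3⟩ := h; subst h2; subst h3; simp
    | cons b bs =>
      by_cases hc : m < b <;> simp [popMinB, hc] at h <;>
        · obtain ⟨h1, h2, h3⟩ := h; subst h2; subst h3; simp; omega

-- Source B's while-loop: `made` is a plain FIFO queue, new values are APPENDED at its back
def mixB (K : Int) (base made : List Int) (count : Int) : Int :=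
  match h1 : popMinB base made with
  | none => 0        -- Python raises IndexError here (excluded by Pre_)
  | some (least, b1, m1) =>
    if least ≥ K then count
    else if b1.length + m1.length < 1 then -1
    else
      match h2 : popMinB b1 m1 with
      | none => -1   -- unreachable: the length test just failed
      | some (nxt, b2, m2) =>
        mixB K b2 (m2 ++ [least + 2 * nxt]) (count + 1)
termination_by base.length + made.length
decreasing_by
  have ha := popMinB_length h1
  have hb := popMinB_length h2
  simp only [List.length_append, List.length_cons, List.length_nil]
  omega

def solution_alt (scoville : List Int) (K : Int) : Int :=
  mixB K (PySem.List.sorted scoville (fun x => x) false) [] 0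

-- ===== PRECONDITION & SPEC =====
-- Pre_ excludes only the empty list, on which Python A raises IndexError at the first heappop.
def Pre_solution (scoville : List Int) (K : Int) : Prop := scoville ≠ []
instance (scoville : List Int) (K : Int) : Decidable (Pre_solution scoville K) := by unfold Pre_solution; infer_instance
def pvWitness_solution : List Int × Int := ([1, 2, 3, 9, 10, 12], 7)

def Spec_solution (scoville : List Int) (K : Int) (out : Int) : Prop := out = solution_alt scoville K
instance (scoville : List Int) (K : Int) (out : Int) : Decidable (Spec_solution scoville K out) := by unfold Spec_solution; infer_instance

-- ===== CLAIM (what is proved, stated in full; the proofs are below) =====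
def Claim_equal_solution : Prop := ∀ (scoville : List Int) (K : Int), Dom_solution scoville K → Pre_solution scoville K → Spec_solution scoville K (solution scoville K)

-- ===== LEMMAS AND PROOFS =====

theorem removeMin_none : ∀ {l : List Int}, removeMin l = none ↔ l = [] := by
  intro l
  cases l with
  | nil => simp [removeMin]
  | cons x xs =>
    simp only [removeMin]
    cases hx : removeMin xs with
    | none => simp
    | some p => obtain ⟨m, ys⟩ := p; by_cases h : x ≤ m <;> simp [h]

theorem removeMin_spec : ∀ {l : List Int} {a : Int} {r : List Int},
    removeMin l = some (a, r) → (a :: r).Perm l ∧ ∀ y ∈ l, a ≤ y := by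
  intro l
  induction l with
  | nil => intro a r h; simp [removeMin] at h
  | cons x xs ih =>
    intro a r h
    simp only [removeMin] at h
    cases hx : removeMin xs with
    | none =>
      rw [hx] at h
      simp at h
      obtain ⟨h1, h2⟩ := h
      subst h1; subst h2
      have hxs : xs = [] := removeMin_none.mp hx
      subst hxs
      exact ⟨List.Perm.refl _, by intro y hy; simp at hy; omega⟩
    | some p =>
      obtain ⟨m, ys⟩ := p
      rw [hx] at h
      obtain ⟨hperm, hmin⟩ := ih hx
      by_cases hle : x ≤ m
      · simp [hle] at h
        obtain ⟨h1, h2⟩ := h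
        subst h1; subst h2
        refine ⟨List.Perm.refl _, ?_⟩
        intro y hy
        rcases List.mem_cons.mp hy with rfl | hy2
        · exact le_refl _
        · exact le_trans hle (hmin y hy2)
      · simp [hle] at h
        obtain ⟨h1, h2⟩ := h
        subst h1; subst h2
        constructor
        · exact (List.Perm.swap x m ys).trans (hperm.cons x)
        · intro y hy
          rcases List.mem_cons.mp hy with rfl | hy2
          · omega
          · exact hmin y hy2

-- on a sorted list removeMin pops the head
theorem removeMin_sorted {a : Int} {t : List Int}
    (h : (a :: t).Pairwise (· ≤ ·)) : removeMin (a :: t) = some (a, t) := by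
  cases t with
  | nil => simp [removeMin]
  | cons y ys =>
    cases hx : removeMin (y :: ys) with
    | none => exact absurd (removeMin_none.mp hx) (by simp)
    | some p =>
      obtain ⟨m, ys'⟩ := p
      have hm : m ∈ y :: ys := (removeMin_spec hx).1.subset List.mem_cons_self
      have ham : a ≤ m := List.rel_of_pairwise_cons h hm
      show (match removeMin (y :: ys) with
            | none => some (a, ([] : List Int))
            | some (m, ys1) => if a ≤ m then some (a, y :: ys) else some (m, a :: ys1)) = some (a, y :: ys)
      rw [hx]
      simp [ham]

-- the four branch equations of mixA
theorem mixA_none {K : Int} {l : List Int} {c : Int} (h : removeMin l = none) :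
    mixA K l c = 0 := by
  unfold mixA; split <;> simp_all

theorem mixA_break {K a : Int} {l r : List Int} {c : Int}
    (h : removeMin l = some (a, r)) (hK : a ≥ K) : mixA K l c = c := by
  unfold mixA
  split
  · simp_all
  · next least rest heq =>
    rw [h] at heq
    obtain ⟨h1, h2⟩ : a = least ∧ r = rest := by simpa using heq
    subst h1
    rw [if_pos hK]

theorem mixA_neg1 {K a : Int} {l r : List Int} {c : Int}
    (h : removeMin l = some (a, r)) (hK : ¬ a ≥ K) (h2 : removeMin r = none) :
    mixA K l c = -1 := by
  unfold mixA
  split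
  · simp_all
  · next least rest heq =>
    rw [h] at heq
    obtain ⟨e1, e2⟩ : a = least ∧ r = rest := by simpa using heq
    subst e1; subst e2
    rw [if_neg hK]
    split
    · rfl
    · next nxt rest2 heq2 => rw [h2] at heq2; simp at heq2

theorem mixA_step {K a b : Int} {l r r2 : List Int} {c : Int}
    (h : removeMin l = some (a, r)) (hK : ¬ a ≥ K) (h2 : removeMin r = some (b, r2)) :
    mixA K l c = mixA K (r2 ++ [a + b * 2]) (c + 1) := by
  unfold mixA
  split
  · simp_all
  · next least rest heq =>
    rw [h] at heq
    obtain ⟨e1, e2⟩ : a = least ∧ r = rest := by simpa using heq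
    subst e1; subst e2
    rw [if_neg hK]
    split
    · next heq2 => rw [h2] at heq2; simp at heq2
    · next nxt rest2 heq2 =>
      rw [h2] at heq2
      obtain ⟨f1, f2⟩ : b = nxt ∧ r2 = rest2 := by simpa using heq2
      subst f1; subst f2
      rw [mixA.eq_def]

-- A's loop is invariant under permutation of the heap contents
theorem mixA_perm (K : Int) : ∀ (n : ℕ) (l l' : List Int) (c : Int),
    l.length ≤ n → l.Perm l' → mixA K l c = mixA K l' c := by
  intro n
  induction n with
  | zero =>
    intro l l' c hlen hp
    have hl : l = [] := List.eq_nil_of_length_eq_zero (by omega)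
    subst hl
    have hl' : l' = [] := hp.symm.eq_nil
    subst hl'
    rfl
  | succ n ih =>
    intro l l' c hlen hp
    cases h1 : removeMin l with
    | none =>
      have hl : l = [] := removeMin_none.mp h1
      subst hl
      have hl' : l' = [] := hp.symm.eq_nil
      subst hl'
      rfl
    | some p =>
      obtain ⟨a, r⟩ := p
      obtain ⟨hperm1, hmin1⟩ := removeMin_spec h1
      cases h1' : removeMin l' with
      | none =>
        exfalso
        have hnil : l' = [] := removeMin_none.mp h1'
        subst hnil
        have : l = [] := hp.eq_nil
        subst this
        simp [removeMin] at h1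
      | some p' =>
        obtain ⟨a', r'⟩ := p'
        obtain ⟨hperm1', hmin1'⟩ := removeMin_spec h1'
        have haa : a = a' := by
          have h1a : a ≤ a' := hmin1 a' (hp.symm.subset (hperm1'.subset List.mem_cons_self))
          have h2a : a' ≤ a := hmin1' a (hp.subset (hperm1.subset List.mem_cons_self))
          omega
        subst haa
        have hrr : r.Perm r' := ((hperm1.trans hp).trans hperm1'.symm).cons_inv
        by_cases hK : a ≥ K
        · rw [mixA_break h1 hK, mixA_break h1' hK]
        · cases h2 : removeMin r with
          | none =>
            have hr : r = [] := removeMin_none.mp h2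
            subst hr
            have hr' : r' = [] := hrr.symm.eq_nil
            subst hr'
            rw [mixA_neg1 h1 hK h2, mixA_neg1 h1' hK rfl]
          | some q =>
            obtain ⟨b, r2⟩ := q
            obtain ⟨hperm2, hmin2⟩ := removeMin_spec h2
            cases h2' : removeMin r' with
            | none =>
              exfalso
              have hnil : r' = [] := removeMin_none.mp h2'
              subst hnil
              have : r = [] := hrr.eq_nil
              subst this
              simp [removeMin] at h2
            | some q' =>
              obtain ⟨b', r2'⟩ := q'
              obtain ⟨hperm2', hmin2'⟩ := removeMin_spec h2'
              have hbb : b = b' := by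
                have h1b : b ≤ b' := hmin2 b' (hrr.symm.subset (hperm2'.subset List.mem_cons_self))
                have h2b : b' ≤ b := hmin2' b (hrr.subset (hperm2.subset List.mem_cons_self))
                omega
              subst hbb
              have hrr2 : r2.Perm r2' := ((hperm2.trans hrr).trans hperm2'.symm).cons_inv
              rw [mixA_step h1 hK h2, mixA_step h1' hK h2']
              have hl1 := removeMin_length h1
              have hl2 := removeMin_length h2
              exact ih _ _ (c + 1) (by simp; omega) (hrr2.append_right _)

-- merge of two sorted lists (ties taken from the first list, matching popMinB)
def pvMerge (b m : List Int) : List Int :=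
  match b, m with
  | [], m => m
  | b, [] => b
  | x :: bs, y :: ms => if x ≤ y then x :: pvMerge bs (y :: ms) else y :: pvMerge (x :: bs) ms
termination_by b.length + m.length

theorem pvMerge_nil_left (m : List Int) : pvMerge [] m = m := by simp [pvMerge]

theorem pvMerge_nil_right (b : List Int) : pvMerge b [] = b := by cases b <;> simp [pvMerge]

theorem pvMerge_cons_cons (x y : Int) (bs ms : List Int) :
    pvMerge (x :: bs) (y :: ms) =
      if x ≤ y then x :: pvMerge bs (y :: ms) else y :: pvMerge (x :: bs) ms := by
  simp [pvMerge]

theorem pvMerge_length : ∀ (b m : List Int), (pvMerge b m).length = b.length + m.length := by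
  intro b
  induction b with
  | nil => intro m; simp [pvMerge_nil_left]
  | cons x bs ihb =>
    intro m
    induction m with
    | nil => simp [pvMerge_nil_right]
    | cons y ms ihm =>
      rw [pvMerge_cons_cons]
      by_cases h : x ≤ y <;> simp [h, ihb, ihm] <;> omega

theorem mem_pvMerge (z : Int) : ∀ (b m : List Int), z ∈ pvMerge b m ↔ z ∈ b ∨ z ∈ m := by
  intro b
  induction b with
  | nil => intro m; simp [pvMerge_nil_left]
  | cons x bs ihb =>
    intro m
    induction m with
    | nil => simp [pvMerge_nil_right]
    | cons y ms ihm =>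
      rw [pvMerge_cons_cons]
      by_cases h : x ≤ y <;> simp [h, ihb, ihm] <;> tauto

theorem pvMerge_perm : ∀ (b m : List Int), (pvMerge b m).Perm (b ++ m) := by
  intro b
  induction b with
  | nil => intro m; rw [pvMerge_nil_left]; simp
  | cons x bs ihb =>
    intro m
    induction m with
    | nil => rw [pvMerge_nil_right]; simp
    | cons y ms ihm =>
      rw [pvMerge_cons_cons]
      by_cases h : x ≤ y
      · rw [if_pos h]
        exact (ihb (y :: ms)).cons x
      · rw [if_neg h]
        refine (ihm.cons y).trans ?_
        have : (y :: (x :: bs) ++ ms).Perm ((x :: bs) ++ y :: ms) :=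
          List.perm_middle.symm
        simpa using this

theorem pvMerge_sorted : ∀ (b m : List Int), b.Pairwise (· ≤ ·) → m.Pairwise (· ≤ ·) →
    (pvMerge b m).Pairwise (· ≤ ·) := by
  intro b
  induction b with
  | nil => intro m _ hm; rw [pvMerge_nil_left]; exact hm
  | cons x bs ihb =>
    intro m hb
    induction m with
    | nil => intro _; rw [pvMerge_nil_right]; exact hb
    | cons y ms ihm =>
      intro hm
      obtain ⟨hxb, hbs⟩ := List.pairwise_cons.mp hb
      obtain ⟨hym, hms⟩ := List.pairwise_cons.mp hm
      rw [pvMerge_cons_cons]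
      by_cases h : x ≤ y
      · rw [if_pos h]
        refine List.pairwise_cons.mpr ⟨?_, ihb (y :: ms) hbs hm⟩
        intro z hz
        rcases (mem_pvMerge z bs (y :: ms)).mp hz with hz1 | hz2
        · exact hxb z hz1
        · rcases List.mem_cons.mp hz2 with rfl | hz3
          · exact h
          · exact le_trans h (hym z hz3)
      · rw [if_neg h]
        refine List.pairwise_cons.mpr ⟨?_, ihm hms⟩
        intro z hz
        rcases (mem_pvMerge z (x :: bs) ms).mp hz with hz1 | hz2
        · rcases List.mem_cons.mp hz1 with rfl | hz3
          · omega
          · have := hxb z hz3; omega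
        · exact hym z hz2

theorem popMinB_none : ∀ {b m : List Int}, popMinB b m = none ↔ b = [] ∧ m = [] := by
  intro b m
  cases m with
  | nil => cases b <;> simp [popMinB]
  | cons q ms =>
    cases b with
    | nil => simp [popMinB]
    | cons p bs =>
      simp only [popMinB]
      split_ifs <;> simp

theorem popMinB_merge_some : ∀ {b m : List Int} {a : Int} {b' m' : List Int},
    popMinB b m = some (a, b', m') → pvMerge b m = a :: pvMerge b' m' := by
  intro b m a b' m' h
  cases m with
  | nil =>
    cases b with
    | nil => simp [popMinB] at h
    | cons p bs =>
      simp [popMinB] at h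
      obtain ⟨h1, h2, h3⟩ := h; subst h1; subst h2; subst h3
      rw [pvMerge_nil_right, pvMerge_nil_right]
  | cons q ms =>
    cases b with
    | nil =>
      simp [popMinB] at h
      obtain ⟨h1, h2, h3⟩ := h; subst h1; subst h2; subst h3
      rw [pvMerge_nil_left, pvMerge_nil_left]
    | cons p bs =>
      by_cases hc : q < p
      · simp [popMinB, hc] at h
        obtain ⟨h1, h2, h3⟩ := h; subst h1; subst h2; subst h3
        rw [pvMerge_cons_cons, if_neg (by omega)]
      · simp [popMinB, hc] at h
        obtain ⟨h1, h2, h3⟩ := h; subst h1; subst h2; subst h3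
        rw [pvMerge_cons_cons, if_pos (by omega)]

theorem popMinB_sorted : ∀ {b m : List Int} {a : Int} {b' m' : List Int},
    b.Pairwise (· ≤ ·) → m.Pairwise (· ≤ ·) → popMinB b m = some (a, b', m') →
    b'.Pairwise (· ≤ ·) ∧ m'.Pairwise (· ≤ ·) := by
  intro b m a b' m' hb hm h
  cases m with
  | nil =>
    cases b with
    | nil => simp [popMinB] at h
    | cons p bs =>
      simp [popMinB] at h
      obtain ⟨h1, h2, h3⟩ := h; subst h2; subst h3
      exact ⟨hb.of_cons, List.Pairwise.nil⟩
  | cons q ms =>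
    cases b with
    | nil =>
      simp [popMinB] at h
      obtain ⟨h1, h2, h3⟩ := h; subst h2; subst h3
      exact ⟨List.Pairwise.nil, hm.of_cons⟩
    | cons p bs =>
      by_cases hc : q < p
      · simp [popMinB, hc] at h
        obtain ⟨h1, h2, h3⟩ := h; subst h2; subst h3
        exact ⟨hb, hm.of_cons⟩
      · simp [popMinB, hc] at h
        obtain ⟨h1, h2, h3⟩ := h; subst h2; subst h3
        exact ⟨hb.of_cons, hm⟩

-- popMinB pops either the head of base or the head of made
theorem popMinB_cases : ∀ {b m : List Int} {a : Int} {b' m' : List Int},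
    popMinB b m = some (a, b', m') →
    (b = a :: b' ∧ m' = m) ∨ (m = a :: m' ∧ b' = b) := by
  intro b m a b' m' h
  cases m with
  | nil =>
    cases b with
    | nil => simp [popMinB] at h
    | cons p bs =>
      simp [popMinB] at h
      obtain ⟨h1, h2, h3⟩ := h; subst h1; subst h2; subst h3
      left; exact ⟨rfl, rfl⟩
  | cons q ms =>
    cases b with
    | nil =>
      simp [popMinB] at h
      obtain ⟨h1, h2, h3⟩ := h; subst h1; subst h2; subst h3
      right; exact ⟨rfl, rfl⟩
    | cons p bs =>
      by_cases hc : q < p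
      · simp [popMinB, hc] at h
        obtain ⟨h1, h2, h3⟩ := h; subst h1; subst h2; subst h3
        right; exact ⟨rfl, rfl⟩
      · simp [popMinB, hc] at h
        obtain ⟨h1, h2, h3⟩ := h; subst h1; subst h2; subst h3
        left; exact ⟨rfl, rfl⟩

-- on sorted lists, the popped element is a lower bound of everything that remains
theorem popMinB_min : ∀ {b m : List Int} {a : Int} {b' m' : List Int},
    b.Pairwise (· ≤ ·) → m.Pairwise (· ≤ ·) → popMinB b m = some (a, b', m') →
    (∀ y ∈ b', a ≤ y) ∧ (∀ y ∈ m', a ≤ y) := by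
  intro b m a b' m' hb hm h
  cases m with
  | nil =>
    cases b with
    | nil => simp [popMinB] at h
    | cons p bs =>
      simp [popMinB] at h
      obtain ⟨h1, h2, h3⟩ := h; subst h1; subst h2; subst h3
      exact ⟨fun y hy => List.rel_of_pairwise_cons hb hy, by simp⟩
  | cons q ms =>
    cases b with
    | nil =>
      simp [popMinB] at h
      obtain ⟨h1, h2, h3⟩ := h; subst h1; subst h2; subst h3
      exact ⟨by simp, fun y hy => List.rel_of_pairwise_cons hm hy⟩
    | cons p bs =>
      by_cases hc : q < p
      · simp [popMinB, hc] at h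
        obtain ⟨h1, h2, h3⟩ := h; subst h1; subst h2; subst h3
        refine ⟨?_, fun y hy => List.rel_of_pairwise_cons hm hy⟩
        intro y hy
        rcases List.mem_cons.mp hy with rfl | hy2
        · omega
        · have := List.rel_of_pairwise_cons hb hy2; omega
      · simp [popMinB, hc] at h
        obtain ⟨h1, h2, h3⟩ := h; subst h1; subst h2; subst h3
        refine ⟨fun y hy => List.rel_of_pairwise_cons hb hy, ?_⟩
        intro y hy
        rcases List.mem_cons.mp hy with rfl | hy2
        · omega
        · have := List.rel_of_pairwise_cons hm hy2; omega

-- the FIFO invariant: every made value x = p + 2q came from a mix whose second-popped value q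
-- is ≤ every remaining original (b) and ≤ every made value produced before x (lo)
def Cert (b lo : List Int) : List Int → Prop
  | [] => True
  | x :: rest =>
      (∃ p q, x = p + 2 * q ∧ p ≤ q ∧ (∀ y ∈ b, q ≤ y) ∧ (∀ y ∈ lo, q ≤ y)) ∧
      Cert b (x :: lo) rest

theorem cert_weaken : ∀ {m b b' lo lo' : List Int},
    (∀ y ∈ b', y ∈ b) → (∀ y ∈ lo', y ∈ lo) → Cert b lo m → Cert b' lo' m := by
  intro m
  induction m with
  | nil => intro b b' lo lo' _ _ _; trivial
  | cons x rest ih =>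
    intro b b' lo lo' hbb hll hc
    obtain ⟨⟨p, q, hx, hpq, hqb, hql⟩, hrest⟩ := hc
    refine ⟨⟨p, q, hx, hpq, fun y hy => hqb y (hbb y hy), fun y hy => hql y (hll y hy)⟩, ?_⟩
    refine ih hbb ?_ hrest
    intro y hy
    rcases List.mem_cons.mp hy with rfl | hy2
    · exact List.mem_cons_self
    · exact List.mem_cons_of_mem _ (hll y hy2)

theorem cert_mem : ∀ {m b lo : List Int} {x : Int}, Cert b lo m → x ∈ m →
    ∃ p q, x = p + 2 * q ∧ p ≤ q ∧ (∀ y ∈ b, q ≤ y) ∧ (∀ y ∈ lo, q ≤ y) := by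
  intro m
  induction m with
  | nil => intro b lo x _ hx; simp at hx
  | cons z rest ih =>
    intro b lo x hc hx
    obtain ⟨hz, hrest⟩ := hc
    rcases List.mem_cons.mp hx with rfl | hx2
    · exact hz
    · obtain ⟨p, q, h1, h2, h3, h4⟩ := ih hrest hx2
      exact ⟨p, q, h1, h2, h3, fun y hy => h4 y (List.mem_cons_of_mem _ hy)⟩

theorem cert_append : ∀ {m b lo : List Int} {z : Int}, Cert b lo m →
    (∃ p q, z = p + 2 * q ∧ p ≤ q ∧ (∀ y ∈ b, q ≤ y) ∧ (∀ y ∈ lo, q ≤ y) ∧ (∀ y ∈ m, q ≤ y)) →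
    Cert b lo (m ++ [z]) := by
  intro m
  induction m with
  | nil =>
    intro b lo z _ hz
    obtain ⟨p, q, h1, h2, h3, h4, _⟩ := hz
    exact ⟨⟨p, q, h1, h2, h3, h4⟩, trivial⟩
  | cons x rest ih =>
    intro b lo z hc hz
    obtain ⟨hx, hrest⟩ := hc
    obtain ⟨p, q, h1, h2, h3, h4, h5⟩ := hz
    refine ⟨hx, ih hrest ⟨p, q, h1, h2, h3, ?_, ?_⟩⟩
    · intro y hy
      rcases List.mem_cons.mp hy with rfl | hy2
      · exact h5 y List.mem_cons_self
      · exact h4 y hy2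
    · intro y hy
      exact h5 y (List.mem_cons_of_mem _ hy)

-- the key step facts: after the two pops, the survivors of made carry certificates whose q is
-- ≤ both popped minima, hence they are all ≤ the new value least + 2*nxt
theorem step_bounds {b m : List Int} {a nxt : Int} {b1 m1 b2 m2 : List Int}
    (hc : Cert b [] m)
    (h1 : popMinB b m = some (a, b1, m1)) (h2 : popMinB b1 m1 = some (nxt, b2, m2)) :
    (∀ x ∈ m2, x ≤ a + 2 * nxt) ∧ Cert b [] m2 ∧ (∀ y ∈ b2, y ∈ b) := by
  rcases popMinB_cases h1 with ⟨hb1, hm1⟩ | ⟨hm1, hb1⟩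
  · rcases popMinB_cases h2 with ⟨hb2, hm2⟩ | ⟨hm2, hb2⟩
    · -- a from b, nxt from b1: b = a :: nxt :: b2, m2 = m1 = m
      have hbb : b = a :: nxt :: b2 := by rw [hb1, hb2]
      have hmm : m2 = m := by rw [hm2, hm1]
      subst hmm
      refine ⟨?_, hc, ?_⟩
      · intro x hx
        obtain ⟨p, q, hx1, hx2, hx3, _⟩ := cert_mem hc hx
        have hqa : q ≤ a := hx3 a (by rw [hbb]; simp)
        have hqn : q ≤ nxt := hx3 nxt (by rw [hbb]; simp)
        omega
      · intro y hy; rw [hbb]; simp [hy]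
    · -- a from b, nxt from m1 = m: m = nxt :: m2
      have hmm : m = nxt :: m2 := by rw [← hm1, hm2]
      rw [hmm] at hc
      obtain ⟨_, hcrest⟩ := hc
      refine ⟨?_, cert_weaken (fun y hy => hy) (by simp) hcrest, ?_⟩
      · intro x hx
        obtain ⟨p, q, hx1, hx2, hx3, hx4⟩ := cert_mem hcrest hx
        have hqa : q ≤ a := hx3 a (by rw [hb1]; simp)
        have hqn : q ≤ nxt := hx4 nxt (by simp)
        omega
      · intro y hy; rw [hb1, ← hb2]; simp [hy]
  · rcases popMinB_cases h2 with ⟨hb2, hm2⟩ | ⟨hm2, hb2⟩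
    · -- a from m, nxt from b1 = b: b = nxt :: b2, m = a :: m2
      have hbb : b = nxt :: b2 := by rw [← hb1, hb2]
      have hmm : m = a :: m2 := by rw [hm1, hm2]
      rw [hmm] at hc
      obtain ⟨_, hcrest⟩ := hc
      refine ⟨?_, cert_weaken (fun y hy => hy) (by simp) hcrest, ?_⟩
      · intro x hx
        obtain ⟨p, q, hx1, hx2, hx3, hx4⟩ := cert_mem hcrest hx
        have hqa : q ≤ a := hx4 a (by simp)
        have hqn : q ≤ nxt := hx3 nxt (by rw [hbb]; simp)
        omega
      · intro y hy; rw [hbb]; simp [hy]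
    · -- a and nxt both from m: m = a :: nxt :: m2, b2 = b1 = b
      have hmm : m = a :: nxt :: m2 := by rw [hm1, hm2]
      rw [hmm] at hc
      obtain ⟨_, _, hcrest⟩ := hc
      refine ⟨?_, cert_weaken (fun y hy => hy) (by simp) hcrest, ?_⟩
      · intro x hx
        obtain ⟨p, q, hx1, hx2, _, hx4⟩ := cert_mem hcrest hx
        have hqn : q ≤ nxt := hx4 nxt (by simp)
        have hqa : q ≤ a := hx4 a (by simp)
        omega
      · intro y hy; rw [← hb1, ← hb2]; exact hy

-- the four branch equations of mixB
theorem mixB_none {K : Int} {b m : List Int} {c : Int} (h : popMinB b m = none) :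
    mixB K b m c = 0 := by
  unfold mixB; split <;> simp_all

theorem mixB_break {K a : Int} {b m b1 m1 : List Int} {c : Int}
    (h : popMinB b m = some (a, b1, m1)) (hK : a ≥ K) : mixB K b m c = c := by
  unfold mixB
  split
  · simp_all
  · next least bb mm heq =>
    rw [h] at heq
    obtain ⟨e1, e2, e3⟩ : a = least ∧ b1 = bb ∧ m1 = mm := by simpa using heq
    subst e1
    rw [if_pos hK]

theorem mixB_neg1 {K a : Int} {b m b1 m1 : List Int} {c : Int}
    (h : popMinB b m = some (a, b1, m1)) (hK : ¬ a ≥ K) (hz : b1.length + m1.length < 1) :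
    mixB K b m c = -1 := by
  unfold mixB
  split
  · simp_all
  · next least bb mm heq =>
    rw [h] at heq
    obtain ⟨e1, e2, e3⟩ : a = least ∧ b1 = bb ∧ m1 = mm := by simpa using heq
    subst e1; subst e2; subst e3
    rw [if_neg hK, if_pos hz]

theorem mixB_step {K a nxt : Int} {b m b1 m1 b2 m2 : List Int} {c : Int}
    (h : popMinB b m = some (a, b1, m1)) (hK : ¬ a ≥ K) (hz : ¬ b1.length + m1.length < 1)
    (h2 : popMinB b1 m1 = some (nxt, b2, m2)) :
    mixB K b m c = mixB K b2 (m2 ++ [a + 2 * nxt]) (c + 1) := by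
  unfold mixB
  split
  · simp_all
  · next least bb mm heq =>
    rw [h] at heq
    obtain ⟨e1, e2, e3⟩ : a = least ∧ b1 = bb ∧ m1 = mm := by simpa using heq
    subst e1; subst e2; subst e3
    rw [if_neg hK, if_neg hz]
    split
    · next heq2 => rw [h2] at heq2; simp at heq2
    · next nxt2 bb2 mm2 heq2 =>
      rw [h2] at heq2
      obtain ⟨f1, f2, f3⟩ : nxt = nxt2 ∧ b2 = bb2 ∧ m2 = mm2 := by simpa using heq2
      subst f1; subst f2; subst f3
      rw [mixB.eq_def]

-- the main bridge: B's two-queue loop equals A's loop run on the merged contents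
theorem mixB_eq_mixA (K : Int) : ∀ (n : ℕ) (b m : List Int) (c : Int),
    b.length + m.length ≤ n → b.Pairwise (· ≤ ·) → m.Pairwise (· ≤ ·) → Cert b [] m →
    mixB K b m c = mixA K (pvMerge b m) c := by
  intro n
  induction n with
  | zero =>
    intro b m c hlen _ _ _
    have hbn : b = [] := List.eq_nil_of_length_eq_zero (by omega)
    have hmn : m = [] := List.eq_nil_of_length_eq_zero (by omega)
    subst hbn; subst hmn
    rw [mixB_none rfl, mixA_none (by simp [pvMerge_nil_left, removeMin])]
  | succ n ih =>
    intro b m c hlen hb hm hcert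
    cases h1 : popMinB b m with
    | none =>
      obtain ⟨rfl, rfl⟩ := popMinB_none.mp h1
      rw [mixB_none h1, mixA_none (by simp [pvMerge_nil_left, removeMin])]
    | some t =>
      obtain ⟨a, b1, m1⟩ := t
      have hmg := popMinB_merge_some h1
      have hsort : (a :: pvMerge b1 m1).Pairwise (· ≤ ·) := hmg ▸ pvMerge_sorted b m hb hm
      have hrm : removeMin (pvMerge b m) = some (a, pvMerge b1 m1) := by
        rw [hmg]; exact removeMin_sorted hsort
      obtain ⟨hb1, hm1⟩ := popMinB_sorted hb hm h1
      have hlen1 := popMinB_length h1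
      by_cases hK : a ≥ K
      · rw [mixB_break h1 hK, mixA_break hrm hK]
      · by_cases hz : b1.length + m1.length < 1
        · have hnil : pvMerge b1 m1 = [] := by
            have hml := pvMerge_length b1 m1
            exact List.eq_nil_of_length_eq_zero (by omega)
          rw [mixB_neg1 h1 hK hz, mixA_neg1 hrm hK (by simp [hnil, removeMin])]
        · cases h2 : popMinB b1 m1 with
          | none =>
            obtain ⟨rfl, rfl⟩ := popMinB_none.mp h2
            simp at hz
          | some t2 =>
            obtain ⟨nxt, b2, m2⟩ := t2
            have hmg2 := popMinB_merge_some h2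
            have hsort2 : (nxt :: pvMerge b2 m2).Pairwise (· ≤ ·) := hmg2 ▸ hsort.of_cons
            have hrm2 : removeMin (pvMerge b1 m1) = some (nxt, pvMerge b2 m2) := by
              rw [hmg2]; exact removeMin_sorted hsort2
            rw [mixB_step h1 hK hz h2, mixA_step hrm hK hrm2]
            obtain ⟨hb2, hm2⟩ := popMinB_sorted hb1 hm1 h2
            have hlen2 := popMinB_length h2
            -- an ≤ nxt (a is the global minimum, nxt was still in the pool)
            obtain ⟨hminb1, hminm1⟩ := popMinB_min hb hm h1
            have hanxt : a ≤ nxt := by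
              rcases popMinB_cases h2 with ⟨hbx, _⟩ | ⟨hmx, _⟩
              · exact hminb1 nxt (hbx ▸ List.mem_cons_self)
              · exact hminm1 nxt (hmx ▸ List.mem_cons_self)
            obtain ⟨hminb2, hminm2⟩ := popMinB_min hb1 hm1 h2
            obtain ⟨hbound, hcert2, hb2sub⟩ := step_bounds hcert h1 h2
            -- made stays sorted after the append
            have hm2' : (m2 ++ [a + 2 * nxt]).Pairwise (· ≤ ·) := by
              rw [List.pairwise_append]
              exact ⟨hm2, by simp, by intro x hx y hy; simp at hy; subst hy; exact hbound x hx⟩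
            -- and carries its certificate
            have hcert2' : Cert b2 [] (m2 ++ [a + 2 * nxt]) := by
              refine cert_append (cert_weaken hb2sub (by simp) hcert2) ?_
              exact ⟨a, nxt, rfl, hanxt, fun y hy => hminb2 y hy, by simp, fun y hy => hminm2 y hy⟩
            rw [ih b2 (m2 ++ [a + 2 * nxt]) (c + 1) (by simp; omega) hb2 hm2' hcert2']
            have hx : a + 2 * nxt = a + nxt * 2 := by ring
            rw [hx]
            refine mixA_perm K (pvMerge b2 (m2 ++ [a + nxt * 2])).length _ _ _ le_rfl ?_
            have p1 := pvMerge_perm b2 (m2 ++ [a + nxt * 2])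
            have p2 : ((b2 ++ m2) ++ [a + nxt * 2]).Perm (pvMerge b2 m2 ++ [a + nxt * 2]) :=
              (pvMerge_perm b2 m2).symm.append_right _
            rw [List.append_assoc] at p2
            exact p1.trans p2

theorem foldl_append_id : ∀ (l acc : List Int), l.foldl (fun h s => h ++ [s]) acc = acc ++ l := by
  intro l
  induction l with
  | nil => simp
  | cons x xs ih => intro acc; simp [List.foldl, ih]

-- ===== VERDICT (by name: the statement is the Claim_ definition above) =====
theorem solution_spec : Claim_equal_solution := by
  intro scoville K _ _
  unfold Spec_solution solution solution_alt
  rw [foldl_append_id]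
  simp only [List.nil_append]
  have hperm : scoville.Perm (PySem.List.sorted scoville (fun x => x) false) := by
    have h := PySem.List.sorted_perm (xs := scoville) (key := fun x : Int => x) (rev := false)
    exact h.symm
  have hsorted : (PySem.List.sorted scoville (fun x => x) false).Pairwise (· ≤ ·) := by
    simpa using PySem.List.sorted_pairwise scoville (fun x : Int => x)
  rw [mixA_perm K scoville.length scoville _ 0 le_rfl hperm]
  have hmain := mixB_eq_mixA K ((PySem.List.sorted scoville (fun x => x) false).length + 0)
      (PySem.List.sorted scoville (fun x => x) false) [] 0 (by simp) hsorted List.Pairwise.nil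
      trivial
  rw [pvMerge_nil_right] at hmain
  exact hmain.symm
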